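-- pv_equiv track=rewrite | github.com/Afonime-Excel123/certificate-generator | generator_long.py | split_text_with_bold
-- ===== SOURCE A (Python) =====
-- def split_text_with_bold(text, bold_phrases):
--     chunks = [(text, False)]
--     for phrase in bold_phrases:
--         new_chunks = []
--         for chunk_text, is_bold in chunks:
--             if is_bold:
--                 new_chunks.append((chunk_text, is_bold))
--                 continue
--             idx = chunk_text.lower().find(phrase.lower())
--             while idx != -1:
--                 before = chunk_text[:idx]
--                 match = chunk_text[idx:idx + len(phrase)]
--                 after = chunk_text[idx + len(phrase):]
--                 if before: new_chunks.append((before, False))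
--                 new_chunks.append((match, True))
--                 chunk_text = after
--                 idx = chunk_text.lower().find(phrase.lower())
--             if chunk_text: new_chunks.append((chunk_text, False))
--         chunks = new_chunks
--     return chunks
-- ===== SOURCE B (Python) =====
-- def split_text_with_bold(text, bold_phrases):
--     # Depth-first worklist: each pending piece carries the index of the next
--     # phrase to apply; bold pieces (tag None) and fully-processed pieces go
--     # straight to the output, so the chunk list is never rebuilt per phrase.
--     n = len(bold_phrases)
--     out = []
--     stack = [(text, 0)]
--     while stack:
--         t, k = stack.pop()
--         if k is None:
--             out.append((t, True))
--         elif k == n: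
--             out.append((t, False))
--         else:
--             p = bold_phrases[k]
--             pieces = []
--             idx = t.lower().find(p.lower())
--             while idx != -1:
--                 before = t[:idx]
--                 if before:
--                     pieces.append((before, k + 1))
--                 pieces.append((t[idx:idx + len(p)], None))
--                 t = t[idx + len(p):]
--                 idx = t.lower().find(p.lower())
--             if t:
--                 pieces.append((t, k + 1))
--             stack.extend(reversed(pieces))
--     return out
-- ===== Notes on version B (the rewrite author's own statement) =====
-- stated objective: faster
-- what changed: Replaces A's breadth-first rebuild of the whole chunk list once per phrase with a depth-first explicit work-stack of (piece, next-phrase-index) items that emits each finished piece to the output exactly once.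
-- outside the precondition, e.g. on split_text_with_bold('', ['a', '']): A returns [], B returns []
import Mathlib
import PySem

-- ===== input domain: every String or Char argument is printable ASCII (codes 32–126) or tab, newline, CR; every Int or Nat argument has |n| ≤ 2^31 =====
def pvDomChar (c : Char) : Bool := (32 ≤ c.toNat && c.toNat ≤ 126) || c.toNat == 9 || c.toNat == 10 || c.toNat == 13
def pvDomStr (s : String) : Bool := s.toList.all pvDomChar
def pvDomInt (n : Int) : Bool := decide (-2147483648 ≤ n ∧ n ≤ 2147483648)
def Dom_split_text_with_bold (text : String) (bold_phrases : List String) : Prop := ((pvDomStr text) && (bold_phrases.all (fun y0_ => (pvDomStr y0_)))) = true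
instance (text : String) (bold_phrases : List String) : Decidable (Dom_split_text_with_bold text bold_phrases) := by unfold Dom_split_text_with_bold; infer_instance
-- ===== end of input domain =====

-- B replaces A's per-phrase rebuild of the whole chunk list with a depth-first work-stack
-- that emits each finished piece exactly once instead of re-copying every chunk per phrase (objective: faster; measured; no argument is mutated).

-- ===== PORT A =====
-- A's inner while loop: scan `chunk` for `phrase` (case-insensitively), appending to `acc`
-- (= new_chunks).  `fuel` only makes the recursion structural: chunk.length + 1 iterations
-- always suffice for a nonempty phrase (each found match consumes ≥ 1 character); where the
-- Python while loop never ends (empty phrase, excluded by Pre_) the fuel runs out.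
-- Slices chunk[:idx], chunk[idx:idx+len], chunk[idx+len:] have nonnegative bounds here
-- (idx ≠ -1), so take/drop are exact.
def innerA (fuel : Nat) (phrase chunk : List Char) (acc : List (String × Bool)) :
    List (String × Bool) :=
  match fuel with
  | 0 => acc
  | fuel + 1 =>
    let idx := PySem.Chars.find (PySem.Chars.lower chunk) (PySem.Chars.lower phrase)
    if idx = -1 then
      if chunk ≠ [] then acc ++ [(String.ofList chunk, false)] else acc
    else
      let i := idx.toNat
      let before := chunk.take i
      let m := (chunk.drop i).take phrase.length
      let after := chunk.drop (i + phrase.length)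
      innerA fuel phrase after
        ((if before ≠ [] then acc ++ [(String.ofList before, false)] else acc) ++
          [(String.ofList m, true)])

def split_text_with_bold (text : String) (bold_phrases : List String) : List (String × Bool) :=
  bold_phrases.foldl
    (fun chunks phrase =>
      chunks.foldl
        (fun new_chunks cb =>
          if cb.2 then new_chunks ++ [cb]
          else innerA (cb.1.toList.length + 1) phrase.toList cb.1.toList new_chunks)
        [])
    [(text, false)]

-- ===== PORT B =====
-- B's inner while loop: split `t` into tagged pieces (`none` = bold match, `some k1` = still
-- to be processed from phrase index k1).  Same fuel remark as for innerA.
def piecesB (fuel : Nat) (p t : List Char) (k1 : Nat) (acc : List (List Char × Option Nat)) :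
    List (List Char × Option Nat) :=
  match fuel with
  | 0 => acc
  | fuel + 1 =>
    let idx := PySem.Chars.find (PySem.Chars.lower t) (PySem.Chars.lower p)
    if idx = -1 then
      if t ≠ [] then acc ++ [(t, some k1)] else acc
    else
      let i := idx.toNat
      let before := t.take i
      let m := (t.drop i).take p.length
      let after := t.drop (i + p.length)
      piecesB fuel p after k1
        ((if before ≠ [] then acc ++ [(before, some k1)] else acc) ++ [(m, none)])

-- B's outer while loop over the stack (head = top; `pieces ++ rest` = extend(reversed(pieces))
-- with pop from the end).  `fuel` bounds the number of pops; the value passed below suffices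
-- whenever all phrases are nonempty (Pre_), where Python's loop terminates.
def runB (fuel : Nat) (phrases : List String) (out : List (String × Bool))
    (stack : List (List Char × Option Nat)) : List (String × Bool) :=
  match fuel with
  | 0 => out
  | fuel + 1 =>
    match stack with
    | [] => out
    | (t, k?) :: rest =>
      match k? with
      | none => runB fuel phrases (out ++ [(String.ofList t, true)]) rest
      | some k =>
        if k = phrases.length then runB fuel phrases (out ++ [(String.ofList t, false)]) rest
        else
          runB fuel phrases out
            -- k < phrases.length in every reachable state; getD "" only makes the lookup total
            (piecesB (t.length + 1) ((phrases[k]?.getD "").toList) t (k + 1) [] ++ rest)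

def split_text_with_bold_alt (text : String) (bold_phrases : List String) :
    List (String × Bool) :=
  runB ((2 * text.toList.length + 2) * 3 ^ bold_phrases.length) bold_phrases []
    [(text.toList, some 0)]

-- ===== PRECONDITION & SPEC =====
-- Pre_ excludes an empty string among bold_phrases: there ''.find('') == 0 makes A's inner
-- while loop (and B's) run forever whenever a non-bold chunk reaches that phrase; on the
-- remaining empty-phrase inputs A happens to return (no non-bold chunk survives) and B
-- returns the same value — see the cite in claim.json.
def Pre_split_text_with_bold (text : String) (bold_phrases : List String) : Prop :=
  ∀ p ∈ bold_phrases, p ≠ ""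
instance (text : String) (bold_phrases : List String) :
    Decidable (Pre_split_text_with_bold text bold_phrases) := by
  unfold Pre_split_text_with_bold; infer_instance
def pvWitness_split_text_with_bold : String × List String :=
  ("Hello bold world", ["BOLD", "o"])
def Spec_split_text_with_bold (text : String) (bold_phrases : List String)
    (out : List (String × Bool)) : Prop := out = split_text_with_bold_alt text bold_phrases
instance (text : String) (bold_phrases : List String) (out : List (String × Bool)) :
    Decidable (Spec_split_text_with_bold text bold_phrases out) := by
  unfold Spec_split_text_with_bold; infer_instance

-- ===== CLAIM (what is proved, stated in full; the proofs are below) =====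
def Claim_equal_split_text_with_bold : Prop := ∀ (text : String) (bold_phrases : List String), Dom_split_text_with_bold text bold_phrases → Pre_split_text_with_bold text bold_phrases → Spec_split_text_with_bold text bold_phrases (split_text_with_bold text bold_phrases)

-- ===== LEMMAS AND PROOFS =====
def scanA (fuel : Nat) (p t : List Char) : List (List Char × Bool) :=
  match fuel with
  | 0 => []
  | fuel + 1 =>
    let idx := PySem.Chars.find (PySem.Chars.lower t) (PySem.Chars.lower p)
    if idx = -1 then
      if t ≠ [] then [(t, false)] else []
    else
      let i := idx.toNat
      (if t.take i ≠ [] then [(t.take i, false)] else []) ++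
        [((t.drop i).take p.length, true)] ++ scanA fuel p (t.drop (i + p.length))

def stepC (p : List Char) (cb : String × Bool) : List (String × Bool) :=
  if cb.2 then [cb]
  else (scanA (cb.1.toList.length + 1) p cb.1.toList).map (fun x => (String.ofList x.1, x.2))

def applyP (ps : List String) (cs : List (String × Bool)) : List (String × Bool) :=
  ps.foldl (fun cs p => cs.flatMap (stepC p.toList)) cs

def denote (phrases : List String) (it : List Char × Option Nat) : List (String × Bool) :=
  match it.2 with
  | none => [(String.ofList it.1, true)]
  | some k => applyP (phrases.drop k) [(String.ofList it.1, false)]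

def pieceW (n : Nat) (it : List Char × Option Nat) : Nat :=
  match it.2 with
  | none => 1
  | some k => (2 * it.1.length + 2) * 3 ^ (n - k)

lemma innerA_eq (p : List Char) :
    ∀ fuel t acc, innerA fuel p t acc =
      acc ++ (scanA fuel p t).map (fun x => (String.ofList x.1, x.2)) := by
  intro fuel
  induction fuel with
  | zero => intro t acc; simp [innerA, scanA]
  | succ f ih =>
    intro t acc
    simp only [innerA, scanA]
    split
    · split <;> simp
    · rw [ih]
      split <;> simp

lemma piecesB_eq (p : List Char) (k1 : Nat) :
    ∀ fuel t acc, piecesB fuel p t k1 acc =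
      acc ++ (scanA fuel p t).map (fun x => (x.1, if x.2 then none else some k1)) := by
  intro fuel
  induction fuel with
  | zero => intro t acc; simp [piecesB, scanA]
  | succ f ih =>
    intro t acc
    simp only [piecesB, scanA]
    split
    · split <;> simp
    · rw [ih]
      split <;> simp
lemma A_eq_applyP (text : String) (ps : List String) :
    split_text_with_bold text ps = applyP ps [(text, false)] := by
  unfold split_text_with_bold applyP
  apply PySem.List.foldl_congr_mem
  intro chunks phrase _
  have h : ∀ cb : String × Bool,
      (fun new_chunks cb =>
        if cb.2 then new_chunks ++ [cb]
        else innerA (cb.1.toList.length + 1) phrase.toList cb.1.toList new_chunks) =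
      (fun new_chunks cb => new_chunks ++ stepC phrase.toList cb) := by
    intro _
    funext nc cb
    by_cases hb : cb.2 <;> simp [hb, stepC, innerA_eq]
  rw [h ⟨"", false⟩, PySem.List.foldl_append_eq_flatMap]
  simp

lemma applyP_append (ps : List String) :
    ∀ xs ys, applyP ps (xs ++ ys) = applyP ps xs ++ applyP ps ys := by
  induction ps with
  | nil => intro xs ys; simp [applyP]
  | cons p ps ih => intro xs ys; simp only [applyP, List.foldl_cons, List.flatMap_append] at *; rw [ih]

lemma applyP_nil (ps : List String) : applyP ps [] = [] := by
  induction ps with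
  | nil => simp [applyP]
  | cons p ps ih => simpa [applyP, List.foldl_cons] using ih

lemma applyP_bold (ps : List String) (s : String) :
    applyP ps [(s, true)] = [(s, true)] := by
  induction ps with
  | nil => simp [applyP]
  | cons p ps ih => simpa [applyP, List.foldl_cons, stepC] using ih

lemma applyP_flat (ps : List String) (cs : List (String × Bool)) :
    applyP ps cs = cs.flatMap (fun c => applyP ps [c]) := by
  induction cs with
  | nil => simp [applyP_nil]
  | cons c cs ih =>
    have : c :: cs = [c] ++ cs := rfl
    rw [this, applyP_append, ih]; simp
lemma scan_weight (p : List Char) (hp : p ≠ []) (m : Nat) :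
    ∀ fuel t, ((scanA fuel p t).map
        (fun x => if x.2 then 1 else (2 * x.1.length + 2) * 3 ^ m)).sum + 1 ≤
      (2 * t.length + 2) * 3 ^ (m + 1) := by
  intro fuel
  have hq : 1 ≤ 3 ^ m := Nat.one_le_pow _ _ (by norm_num)
  have hq1 : 1 ≤ 3 ^ (m + 1) := Nat.one_le_pow _ _ (by norm_num)
  have h31 : 3 ^ (m + 1) = 3 * 3 ^ m := by ring
  induction fuel with
  | zero =>
    intro t
    have : ((scanA 0 p t).map
        (fun x => if x.2 = true then 1 else (2 * x.1.length + 2) * 3 ^ m)).sum = 0 := by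
      simp [scanA]
    rw [this]
    have h2 : 1 * 1 ≤ (2 * t.length + 2) * 3 ^ (m + 1) := Nat.mul_le_mul (by omega) hq1
    omega
  | succ f ih =>
    intro t
    simp only [scanA]
    by_cases h : PySem.Chars.find (PySem.Chars.lower t) (PySem.Chars.lower p) = -1
    · rw [if_pos h]
      split
      · simp only [List.map_cons, List.map_nil, List.sum_cons, List.sum_nil,
          Bool.false_eq_true, if_false]
        nlinarith [hq, t.length]
      · simp only [List.map_nil, List.sum_nil]
        have h2 : 1 * 1 ≤ (2 * t.length + 2) * 3 ^ (m + 1) := Nat.mul_le_mul (by omega) hq1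
        omega
    · rw [if_neg h]
      have h0 : 0 ≤ PySem.Chars.find (PySem.Chars.lower t) (PySem.Chars.lower p) := by
        have := PySem.Chars.neg_one_le_find (PySem.Chars.lower t) (PySem.Chars.lower p)
        omega
      have hsp := (PySem.Chars.find_spec h0).1
      have hL : 1 ≤ p.length := by
        cases p with | nil => exact absurd rfl hp | cons a l => simp
      set i := (PySem.Chars.find (PySem.Chars.lower t) (PySem.Chars.lower p)).toNat with hi
      have hlen : i + p.length ≤ t.length := by
        have h1 := hsp.length_le
        rw [List.length_drop] at h1
        have h2 : (PySem.Chars.lower t).length = t.length := by simp [PySem.Chars.lower]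
        have h3 : (PySem.Chars.lower p).length = p.length := by simp [PySem.Chars.lower]
        omega
      have htake : (t.take i).length = i := by rw [List.length_take]; omega
      have hdrop : (t.drop (i + p.length)).length = t.length - (i + p.length) :=
        List.length_drop ..
      have hrec := ih (t.drop (i + p.length))
      rw [hdrop] at hrec
      obtain ⟨a, ha⟩ : ∃ a, t.length = a + (i + p.length) :=
        ⟨t.length - (i + p.length), by omega⟩
      have ha' : t.length - (i + p.length) = a := by omega
      rw [ha'] at hrec
      have key : (2 * i + 2) * 3 ^ m + 1 ≤ (2 * i + 2 * p.length) * (3 * 3 ^ m) := by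
        nlinarith [hq, hL]
      split
      · simp only [List.map_append, List.map_cons, List.map_nil, List.sum_append,
          List.sum_cons, List.sum_nil, Bool.false_eq_true, if_false, if_true, htake]
        rw [ha, h31] at *
        nlinarith [hrec, key]
      · simp only [List.map_append, List.map_cons, List.map_nil, List.sum_append,
          List.sum_cons, List.sum_nil, Bool.false_eq_true, if_true]
        rw [ha, h31] at *
        nlinarith [hrec, key]
lemma pieceW_pos (n : Nat) (it : List Char × Option Nat) : 1 ≤ pieceW n it := by
  obtain ⟨t, k?⟩ := it
  cases k? with
  | none => simp [pieceW]
  | some k =>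
    simp only [pieceW]
    have : 1 ≤ 3 ^ (n - k) := Nat.one_le_pow _ _ (by norm_num)
    calc 1 = 1 * 1 := rfl
    _ ≤ (2 * t.length + 2) * 3 ^ (n - k) := Nat.mul_le_mul (by omega) this

lemma pieces_flatMap_denote (phrases : List String) (k : Nat) (hk : k < phrases.length)
    (t : List Char) :
    (piecesB (t.length + 1) ((phrases[k]?.getD "").toList) t (k + 1) []).flatMap
        (denote phrases) = denote phrases (t, some k) := by
  have hget : phrases[k]?.getD "" = phrases[k] := by simp [hk]
  rw [hget, piecesB_eq]
  simp only [List.nil_append, denote]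
  rw [List.drop_eq_getElem_cons hk]
  show _ = applyP (phrases[k] :: phrases.drop (k + 1)) [(String.ofList t, false)]
  have hcons : applyP (phrases[k] :: phrases.drop (k + 1)) [(String.ofList t, false)] =
      applyP (phrases.drop (k + 1))
        ([(String.ofList t, false)].flatMap (stepC (phrases[k]).toList)) := rfl
  rw [hcons]
  simp only [List.flatMap_cons, List.flatMap_nil, List.append_nil, stepC,
    Bool.false_eq_true, if_false, String.toList_ofList]
  rw [applyP_flat, List.flatMap_map, List.flatMap_map]
  apply List.flatMap_congr
  intro x hx
  by_cases hx2 : x.2 <;> simp [hx2, denote, applyP_bold]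

lemma run_eq (phrases : List String) (hps : ∀ p ∈ phrases, p ≠ "") :
    ∀ fuel stack out,
      (∀ it ∈ stack, ∀ k, it.2 = some k → k ≤ phrases.length) →
      (stack.map (pieceW phrases.length)).sum ≤ fuel →
      runB fuel phrases out stack = out ++ stack.flatMap (denote phrases) := by
  intro fuel
  induction fuel using Nat.strong_induction_on with
  | _ fuel ih =>
    intro stack out hwf hw
    cases stack with
    | nil => cases fuel <;> simp [runB]
    | cons it rest =>
      obtain ⟨t, k?⟩ := it
      cases fuel with
      | zero =>
        exfalso
        have := pieceW_pos phrases.length (t, k?)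
        simp only [List.map_cons, List.sum_cons] at hw
        omega
      | succ f =>
        simp only [List.map_cons, List.sum_cons] at hw
        have hf : f < f + 1 := Nat.lt_succ_self f
        cases k? with
        | none =>
          show runB f phrases (out ++ [(String.ofList t, true)]) rest = _
          rw [ih f hf rest _ (fun it h => hwf it (List.mem_cons_of_mem _ h))
            (by have := pieceW_pos phrases.length (t, none); omega)]
          simp [denote]
        | some k =>
          have hk_le : k ≤ phrases.length := hwf (t, some k) List.mem_cons_self k rfl
          by_cases hk : k = phrases.length
          · show (if k = phrases.length then
                runB f phrases (out ++ [(String.ofList t, false)]) rest else _) = _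
            rw [if_pos hk]
            rw [ih f hf rest _ (fun it h => hwf it (List.mem_cons_of_mem _ h))
              (by have := pieceW_pos phrases.length (t, some k); omega)]
            simp [denote, hk, applyP]
          · have hk' : k < phrases.length := lt_of_le_of_ne hk_le hk
            show (if k = phrases.length then _ else runB f phrases out
                (piecesB (t.length + 1) ((phrases[k]?.getD "").toList) t (k + 1) [] ++ rest)) = _
            rw [if_neg hk]
            have hp : (phrases[k]?.getD "").toList ≠ [] := by
              have hmem : phrases[k] ∈ phrases := List.getElem_mem hk'
              have hne := hps _ hmem
              simp [hk']
              exact fun hc => hne hc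
            have hwfp : ∀ it ∈ piecesB (t.length + 1) ((phrases[k]?.getD "").toList) t (k + 1) [],
                ∀ k', it.2 = some k' → k' ≤ phrases.length := by
              rw [piecesB_eq]
              intro it hmem k' hk2
              simp only [List.nil_append, List.mem_map] at hmem
              obtain ⟨x, _, rfl⟩ := hmem
              by_cases hx : x.2 <;> simp [hx] at hk2 <;> omega
            have hwp : ((piecesB (t.length + 1) ((phrases[k]?.getD "").toList) t (k + 1) []).map
                (pieceW phrases.length)).sum + 1 ≤ pieceW phrases.length (t, some k) := by
              rw [piecesB_eq]
              simp only [List.nil_append, List.map_map]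
              have hsw := scan_weight _ hp (phrases.length - k - 1) (t.length + 1) t
              have hmeq : (phrases.length - k - 1) + 1 = phrases.length - k := by omega
              rw [hmeq] at hsw
              have : ((scanA (t.length + 1) ((phrases[k]?.getD "").toList) t).map
                  (pieceW phrases.length ∘ fun x => (x.1, if x.2 then none else some (k + 1)))) =
                  ((scanA (t.length + 1) ((phrases[k]?.getD "").toList) t).map
                  (fun x => if x.2 then 1 else (2 * x.1.length + 2) * 3 ^ (phrases.length - k - 1))) := by
                apply List.map_congr_left
                intro x _
                by_cases hx : x.2 <;> simp [hx, pieceW, Nat.sub_sub]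
              rw [this]
              simpa [pieceW] using hsw
            rw [ih f hf _ out
              (by intro it h; rcases List.mem_append.1 h with h1 | h1
                  · exact hwfp it h1
                  · exact hwf it (List.mem_cons_of_mem _ h1))
              (by rw [List.map_append, List.sum_append]; omega)]
            rw [List.flatMap_append, List.flatMap_cons,
              pieces_flatMap_denote phrases k hk' t]

-- ===== VERDICT (by name: the statement is the Claim_ definition above) =====
theorem split_text_with_bold_spec : Claim_equal_split_text_with_bold := by
  intro text ps _ hpre
  unfold Spec_split_text_with_bold
  rw [A_eq_applyP]
  unfold split_text_with_bold_alt
  rw [run_eq ps hpre _ _ []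
    (by intro it h k hk; simp at h; subst h; simp at hk; omega)
    (by simp [pieceW])]
  simp [denote, applyP]
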